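-- pv_equiv track=rewrite | github.com/Rainious/Mc-AI-Builder | src/compile_spec.py | _iter_box_hollow
-- ===== SOURCE A (Python) =====
-- from typing import Any, Iterator
--
-- def _iter_box_hollow(
--     start: tuple[int, int, int], end: tuple[int, int, int]
-- ) -> Iterator[tuple[int, int, int]]:
--     """Yield only shell coordinates in an inclusive rectangular box."""
--     min_x, max_x = sorted((start[0], end[0]))
--     min_y, max_y = sorted((start[1], end[1]))
--     min_z, max_z = sorted((start[2], end[2]))
--
--     for x in range(min_x, max_x + 1):
--         for y in range(min_y, max_y + 1):
--             for z in range(min_z, max_z + 1):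
--                 if (
--                     x in (min_x, max_x)
--                     or y in (min_y, max_y)
--                     or z in (min_z, max_z)
--                 ):
--                     yield (x, y, z)
-- ===== SOURCE B (Python) =====
-- def _iter_box_hollow(start, end):
--     """Yield only shell coordinates in an inclusive rectangular box.
--
--     Builds each x-plane declaratively: a boundary plane is the full y-z
--     rectangle; an interior plane keeps full boundary y-rows and, for interior
--     rows, only the two z-edge cells. Same x,y,z yield order as the filter."""
--     min_x, max_x = sorted((start[0], end[0]))
--     min_y, max_y = sorted((start[1], end[1]))
--     min_z, max_z = sorted((start[2], end[2]))
--     ys = range(min_y, max_y + 1)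
--     zs = range(min_z, max_z + 1)
--     z_edge = [min_z] if min_z == max_z else [min_z, max_z]
--     for x in range(min_x, max_x + 1):
--         if x in (min_x, max_x):
--             yield from ((x, y, z) for y in ys for z in zs)
--         else:
--             yield from ((x, y, z) for y in ys
--                         for z in (zs if y in (min_y, max_y) else z_edge))
-- ===== Notes on version B (the rewrite author's own statement) =====
-- stated objective: faster
-- what changed: B constructs the shell directly and declaratively per x-plane (full y-z rectangle on boundary planes, otherwise full boundary y-rows plus just the two z-edge cells per interior row) via generator expressions, instead of A's triple nested loop over the whole volume filtering each cell; yield order preserved.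
import Mathlib
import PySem

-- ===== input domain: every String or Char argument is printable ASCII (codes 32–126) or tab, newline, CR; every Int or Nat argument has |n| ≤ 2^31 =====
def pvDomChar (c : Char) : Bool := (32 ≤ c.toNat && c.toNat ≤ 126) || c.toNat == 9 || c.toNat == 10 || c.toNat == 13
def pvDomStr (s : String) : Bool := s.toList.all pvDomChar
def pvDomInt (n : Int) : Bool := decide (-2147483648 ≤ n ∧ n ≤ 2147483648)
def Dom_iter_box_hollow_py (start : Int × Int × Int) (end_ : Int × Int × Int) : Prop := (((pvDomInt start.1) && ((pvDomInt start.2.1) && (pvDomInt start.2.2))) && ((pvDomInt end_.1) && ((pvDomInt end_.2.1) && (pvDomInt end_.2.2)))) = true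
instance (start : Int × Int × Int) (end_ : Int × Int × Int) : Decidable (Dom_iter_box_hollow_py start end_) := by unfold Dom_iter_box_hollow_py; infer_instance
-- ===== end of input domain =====

-- B builds the shell directly and declaratively per x-plane (full rectangle on boundary
-- planes, otherwise boundary y-rows plus the two z-edge cells) instead of A's triple nested
-- loop over the whole volume filtering each cell; same triples in the same x,y,z order.

-- Python's `sorted((a, b))` on a pair of ints, exact.
def pySort2 (a b : Int) : Int × Int := if a ≤ b then (a, b) else (b, a)

-- ===== PORT A =====
-- The generator's yields are collected front-to-back: each `for` loop is the obvious
-- tail recursion on its counter, consing each yielded triple and reversing at the end.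
def aLoopZ (mX MX mY MY mZ MZ x y z : Int) (acc : List (Int × Int × Int)) : List (Int × Int × Int) :=
  if _h : z ≤ MZ then
    aLoopZ mX MX mY MY mZ MZ x y (z + 1)
      (if x = mX ∨ x = MX ∨ y = mY ∨ y = MY ∨ z = mZ ∨ z = MZ then (x, y, z) :: acc else acc)
  else acc
  termination_by (MZ + 1 - z).toNat
  decreasing_by omega

def aLoopY (mX MX mY MY mZ MZ x y : Int) (acc : List (Int × Int × Int)) : List (Int × Int × Int) :=
  if _h : y ≤ MY then
    aLoopY mX MX mY MY mZ MZ x (y + 1) (aLoopZ mX MX mY MY mZ MZ x y mZ acc)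
  else acc
  termination_by (MY + 1 - y).toNat
  decreasing_by omega

def aLoopX (mX MX mY MY mZ MZ x : Int) (acc : List (Int × Int × Int)) : List (Int × Int × Int) :=
  if _h : x ≤ MX then
    aLoopX mX MX mY MY mZ MZ (x + 1) (aLoopY mX MX mY MY mZ MZ x mY acc)
  else acc
  termination_by (MX + 1 - x).toNat
  decreasing_by omega

def iter_box_hollow_py (start : Int × Int × Int) (end_ : Int × Int × Int) : List (Int × Int × Int) :=
  let px := pySort2 start.1 end_.1
  let py := pySort2 start.2.1 end_.2.1
  let pz := pySort2 start.2.2 end_.2.2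
  (aLoopX px.1 px.2 py.1 py.2 pz.1 pz.2 px.1 []).reverse

-- ===== PORT B =====
-- Source B's generator expressions become flatMap/map over the same ranges; no loop state.
def iter_box_hollow_py_alt (start : Int × Int × Int) (end_ : Int × Int × Int) : List (Int × Int × Int) :=
  let px := pySort2 start.1 end_.1
  let py := pySort2 start.2.1 end_.2.1
  let pz := pySort2 start.2.2 end_.2.2
  let ys := PySem.List.pyRange py.1 (py.2 + 1) 1
  let zs := PySem.List.pyRange pz.1 (pz.2 + 1) 1
  let zEdge : List Int := if pz.1 = pz.2 then [pz.1] else [pz.1, pz.2]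
  (PySem.List.pyRange px.1 (px.2 + 1) 1).flatMap fun x =>
    if x = px.1 ∨ x = px.2 then
      ys.flatMap fun y => zs.map fun z => (x, y, z)
    else
      ys.flatMap fun y =>
        (if y = py.1 ∨ y = py.2 then zs else zEdge).map fun z => (x, y, z)

-- ===== PRECONDITION & SPEC =====
def Spec_iter_box_hollow_py (start : Int × Int × Int) (end_ : Int × Int × Int) (out : List (Int × Int × Int)) : Prop := out = iter_box_hollow_py_alt start end_
instance (start : Int × Int × Int) (end_ : Int × Int × Int) (out : List (Int × Int × Int)) : Decidable (Spec_iter_box_hollow_py start end_ out) := by unfold Spec_iter_box_hollow_py; infer_instance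

-- ===== CLAIM (what is proved, stated in full; the proofs are below) =====
def Claim_equal_iter_box_hollow_py : Prop := ∀ (start : Int × Int × Int) (end_ : Int × Int × Int), Dom_iter_box_hollow_py start end_ → Spec_iter_box_hollow_py start end_ (iter_box_hollow_py start end_)

-- ===== LEMMAS AND PROOFS =====

theorem flatMap_single {α β : Type} (l : List α) (f : α → β) :
    l.flatMap (fun a => [f a]) = l.map f := by
  induction l with
  | nil => rfl
  | cons a t ih => simp [List.flatMap_cons, ih]

theorem flatMap_congr_mem {α β : Type} (l : List α) (f g : α → List β)
    (h : ∀ a ∈ l, f a = g a) : l.flatMap f = l.flatMap g := by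
  induction l with
  | nil => rfl
  | cons a t ih =>
    simp only [List.flatMap_cons, h a (List.mem_cons_self), ih fun b hb => h b (List.mem_cons_of_mem a hb)]

-- the filter-style body of A's triple loop, as a flatMap over ranges
def aF (mX MX mY MY mZ MZ : Int) : List (Int × Int × Int) :=
  (PySem.List.pyRange mX (MX + 1) 1).flatMap fun x =>
    (PySem.List.pyRange mY (MY + 1) 1).flatMap fun y =>
      (PySem.List.pyRange mZ (MZ + 1) 1).flatMap fun z =>
        if x = mX ∨ x = MX ∨ y = mY ∨ y = MY ∨ z = mZ ∨ z = MZ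
        then [(x, y, z)] else []

-- the z-edge of an interior row: only the two endpoints survive the filter
theorem edge_lemma (lo hi : Int) (h : lo ≤ hi) (f : Int → List (Int × Int × Int)) :
    (PySem.List.pyRange lo (hi + 1) 1).flatMap (fun z => if z = lo ∨ z = hi then f z else []) =
      (if lo = hi then [lo] else [lo, hi]).flatMap f := by
  rcases eq_or_lt_of_le h with heq | hlt
  · subst heq
    rw [PySem.List.pyRange_one_singleton]
    simp
  · rw [PySem.List.pyRange_one_append lo (lo + 1) (hi + 1) (by omega) (by omega),
        PySem.List.pyRange_one_append (lo + 1) hi (hi + 1) (by omega) (by omega),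
        PySem.List.pyRange_one_singleton]
    have hhi : PySem.List.pyRange hi (hi + 1) 1 = [hi] := PySem.List.pyRange_one_singleton hi
    rw [hhi]
    have hmid : (PySem.List.pyRange (lo + 1) hi 1).flatMap
        (fun z => if z = lo ∨ z = hi then f z else []) = [] := by
      rw [List.flatMap_eq_nil_iff]
      intro z hz
      have := PySem.List.mem_pyRange_one.mp hz
      have : ¬ (z = lo ∨ z = hi) := by omega
      simp [this]
    simp only [List.flatMap_append, hmid, List.append_nil, List.flatMap_cons, List.flatMap_nil]
    have hne : lo ≠ hi := by omega
    simp [hne]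

-- A's filtered volume equals B's direct shell enumeration (the heart of the equivalence)
theorem core (mX MX mY MY mZ MZ : Int) (hz : mZ ≤ MZ) :
    aF mX MX mY MY mZ MZ =
      (PySem.List.pyRange mX (MX + 1) 1).flatMap (fun x =>
        if x = mX ∨ x = MX then
          (PySem.List.pyRange mY (MY + 1) 1).flatMap fun y =>
            (PySem.List.pyRange mZ (MZ + 1) 1).map fun z => (x, y, z)
        else
          (PySem.List.pyRange mY (MY + 1) 1).flatMap fun y =>
            (if y = mY ∨ y = MY then PySem.List.pyRange mZ (MZ + 1) 1
             else if mZ = MZ then [mZ] else [mZ, MZ]).map fun z => (x, y, z)) := by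
  unfold aF
  apply flatMap_congr_mem
  intro x _
  by_cases hxb : x = mX ∨ x = MX
  · simp only [hxb, if_true]
    apply flatMap_congr_mem
    intro y _
    rw [← flatMap_single (PySem.List.pyRange mZ (MZ + 1) 1) (fun z => (x, y, z))]
    apply flatMap_congr_mem
    intro z _
    have h6 : x = mX ∨ x = MX ∨ y = mY ∨ y = MY ∨ z = mZ ∨ z = MZ := by tauto
    rw [if_pos h6]
  · simp only [hxb, if_false]
    apply flatMap_congr_mem
    intro y _
    by_cases hyb : y = mY ∨ y = MY
    · simp only [hyb, if_true]
      rw [← flatMap_single (PySem.List.pyRange mZ (MZ + 1) 1) (fun z => (x, y, z))]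
      apply flatMap_congr_mem
      intro z _
      have h6 : x = mX ∨ x = MX ∨ y = mY ∨ y = MY ∨ z = mZ ∨ z = MZ := by tauto
      rw [if_pos h6]
    · simp only [hyb, if_false]
      have hrow : ((PySem.List.pyRange mZ (MZ + 1) 1).flatMap fun z =>
          if x = mX ∨ x = MX ∨ y = mY ∨ y = MY ∨ z = mZ ∨ z = MZ
          then [(x, y, z)] else []) =
          (PySem.List.pyRange mZ (MZ + 1) 1).flatMap fun z =>
            if z = mZ ∨ z = MZ then [(x, y, z)] else [] := by
        apply flatMap_congr_mem
        intro z _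
        by_cases hzb : z = mZ ∨ z = MZ
        · have h6 : x = mX ∨ x = MX ∨ y = mY ∨ y = MY ∨ z = mZ ∨ z = MZ := by tauto
          rw [if_pos h6, if_pos hzb]
        · have h6 : ¬ (x = mX ∨ x = MX ∨ y = mY ∨ y = MY ∨ z = mZ ∨ z = MZ) := by tauto
          rw [if_neg h6, if_neg hzb]
      rw [hrow, edge_lemma mZ MZ hz]
      rw [← flatMap_single (if mZ = MZ then [mZ] else [mZ, MZ]) (fun z => (x, y, z))]

-- ---- A's loops compute aF (reversed onto the accumulator) ----

theorem aLoopZ_spec (mX MX mY MY mZ MZ x y : Int) :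
    ∀ (n : Nat) (z : Int) (acc : List (Int × Int × Int)), (MZ + 1 - z).toNat = n →
      aLoopZ mX MX mY MY mZ MZ x y z acc =
        ((PySem.List.pyRange z (MZ + 1) 1).flatMap fun w =>
          if x = mX ∨ x = MX ∨ y = mY ∨ y = MY ∨ w = mZ ∨ w = MZ
          then [(x, y, w)] else []).reverse ++ acc := by
  intro n
  induction n with
  | zero =>
    intro z acc h
    rw [aLoopZ]
    rw [dif_neg (by omega : ¬ z ≤ MZ), PySem.List.pyRange_one_eq_nil (show MZ + 1 ≤ z by omega)]
    simp
  | succ k ih =>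
    intro z acc h
    rw [aLoopZ, dif_pos (by omega : z ≤ MZ), ih (z + 1) _ (by omega),
        PySem.List.pyRange_one_cons (by omega : z < MZ + 1)]
    by_cases hc : x = mX ∨ x = MX ∨ y = mY ∨ y = MY ∨ z = mZ ∨ z = MZ
    · simp [hc]
    · simp [hc]

theorem aLoopY_spec (mX MX mY MY mZ MZ x : Int) :
    ∀ (n : Nat) (y : Int) (acc : List (Int × Int × Int)), (MY + 1 - y).toNat = n →
      aLoopY mX MX mY MY mZ MZ x y acc =
        ((PySem.List.pyRange y (MY + 1) 1).flatMap fun v =>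
          (PySem.List.pyRange mZ (MZ + 1) 1).flatMap fun w =>
            if x = mX ∨ x = MX ∨ v = mY ∨ v = MY ∨ w = mZ ∨ w = MZ
            then [(x, v, w)] else []).reverse ++ acc := by
  intro n
  induction n with
  | zero =>
    intro y acc h
    rw [aLoopY]
    rw [dif_neg (by omega : ¬ y ≤ MY), PySem.List.pyRange_one_eq_nil (show MY + 1 ≤ y by omega)]
    simp
  | succ k ih =>
    intro y acc h
    rw [aLoopY, dif_pos (by omega : y ≤ MY), ih (y + 1) _ (by omega),
        aLoopZ_spec mX MX mY MY mZ MZ x y _ mZ acc rfl,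
        PySem.List.pyRange_one_cons (by omega : y < MY + 1)]
    simp

theorem aLoopX_spec (mX MX mY MY mZ MZ : Int) :
    ∀ (n : Nat) (x : Int) (acc : List (Int × Int × Int)), (MX + 1 - x).toNat = n →
      aLoopX mX MX mY MY mZ MZ x acc =
        ((PySem.List.pyRange x (MX + 1) 1).flatMap fun u =>
          (PySem.List.pyRange mY (MY + 1) 1).flatMap fun v =>
            (PySem.List.pyRange mZ (MZ + 1) 1).flatMap fun w =>
              if u = mX ∨ u = MX ∨ v = mY ∨ v = MY ∨ w = mZ ∨ w = MZ
              then [(u, v, w)] else []).reverse ++ acc := by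
  intro n
  induction n with
  | zero =>
    intro x acc h
    rw [aLoopX]
    rw [dif_neg (by omega : ¬ x ≤ MX), PySem.List.pyRange_one_eq_nil (show MX + 1 ≤ x by omega)]
    simp
  | succ k ih =>
    intro x acc h
    rw [aLoopX, dif_pos (by omega : x ≤ MX), ih (x + 1) _ (by omega),
        aLoopY_spec mX MX mY MY mZ MZ x _ mY acc rfl,
        PySem.List.pyRange_one_cons (by omega : x < MX + 1)]
    simp

theorem pySort2_le (a b : Int) : (pySort2 a b).1 ≤ (pySort2 a b).2 := by
  unfold pySort2; split_ifs with h <;> simp <;> omega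

-- ===== VERDICT (by name: the statement is the Claim_ definition above) =====
theorem iter_box_hollow_py_spec : Claim_equal_iter_box_hollow_py := by
  intro start end_ _
  simp only [Spec_iter_box_hollow_py, iter_box_hollow_py, iter_box_hollow_py_alt]
  rw [aLoopX_spec _ _ _ _ _ _ _ _ _ rfl]
  simp only [List.append_nil, List.reverse_reverse]
  exact core (pySort2 start.1 end_.1).1 (pySort2 start.1 end_.1).2
    (pySort2 start.2.1 end_.2.1).1 (pySort2 start.2.1 end_.2.1).2
    (pySort2 start.2.2 end_.2.2).1 (pySort2 start.2.2 end_.2.2).2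
    (pySort2_le start.2.2 end_.2.2)
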